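-- pv_equiv track=rewrite | github.com/Software-Engineering-Group-UP/FAIR-test | tool/scripts/test.py | check_comment
-- ===== SOURCE A (Python) =====
-- def check_comment(file_content):
--     """
--     Check if a file starts with a comment.
--
--     Args:
--     - file_content: The content of the file to check.
--
--     Returns:
--     - True if the file starts with a comment, False otherwise.
--     """
--     lines = file_content.split('\n')
--     for line in lines:
--         stripped_line = line.strip()
--         if stripped_line:  # if the line is not empty
--             if stripped_line.startswith('#') or stripped_line.startswith('%') or stripped_line.startswith('"""') or stripped_line.startswith("'''"):
--                 return True
--             else:
--                 return False
--     return False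
-- ===== SOURCE B (Python) =====
-- def check_comment(file_content):
--     """
--     Check if a file starts with a comment.
--
--     Args:
--     - file_content: The content of the file to check.
--
--     Returns:
--     - True if the file starts with a comment, False otherwise.
--     """
--     return file_content.lstrip().startswith(('#', '%', '"""', "'''"))
-- ===== Notes on version B (the rewrite author's own statement) =====
-- stated objective: simpler
-- what changed: Replaces the split-into-lines plus per-line strip loop by a single lstrip of the whole content followed by one tuple startswith: leading whitespace including blank lines is removed at once, so no loop, no split and no per-line stripping.
import Mathlib
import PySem

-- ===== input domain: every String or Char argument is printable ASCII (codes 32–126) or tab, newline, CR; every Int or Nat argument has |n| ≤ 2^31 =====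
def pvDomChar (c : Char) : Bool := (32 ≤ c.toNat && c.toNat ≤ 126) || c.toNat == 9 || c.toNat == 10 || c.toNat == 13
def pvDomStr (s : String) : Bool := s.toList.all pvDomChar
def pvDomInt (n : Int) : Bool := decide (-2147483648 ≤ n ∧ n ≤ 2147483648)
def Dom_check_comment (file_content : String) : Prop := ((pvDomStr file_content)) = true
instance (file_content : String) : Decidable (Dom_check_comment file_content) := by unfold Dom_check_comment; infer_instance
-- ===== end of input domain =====

-- B replaces A's split('\n') + per-line strip loop by one lstrip of the whole
-- content followed by a single tuple-startswith check (simpler; same cost).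


-- ===== PORT A =====
-- the for-loop over lines: strip each line; at the first non-empty one return the marker test
def checkLinesA : List (List Char) → Bool
  | [] => false
  | line :: rest =>
    let stripped_line := PySem.Chars.strip line
    if stripped_line ≠ [] then
      (PySem.Chars.startswith stripped_line ['#'] ||
       PySem.Chars.startswith stripped_line ['%'] ||
       PySem.Chars.startswith stripped_line ['"', '"', '"'] ||
       PySem.Chars.startswith stripped_line ['\'', '\'', '\''])
    else
      checkLinesA rest

def check_comment (file_content : String) : Bool :=
  checkLinesA (PySem.Chars.splitOn file_content.toList ['\n'])

-- ===== PORT B =====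
def check_comment_alt (file_content : String) : Bool :=
  let s := PySem.Chars.lstrip file_content.toList
  PySem.Chars.startswith s ['#'] ||
  PySem.Chars.startswith s ['%'] ||
  PySem.Chars.startswith s ['"', '"', '"'] ||
  PySem.Chars.startswith s ['\'', '\'', '\'']

-- ===== PRECONDITION & SPEC =====
def Spec_check_comment (file_content : String) (out : Bool) : Prop := out = check_comment_alt file_content
instance (file_content : String) (out : Bool) : Decidable (Spec_check_comment file_content out) := by unfold Spec_check_comment; infer_instance

-- ===== CLAIM (what is proved, stated in full; the proofs are below) =====
def Claim_equal_check_comment : Prop := ∀ (file_content : String), Dom_check_comment file_content → Spec_check_comment file_content (check_comment file_content)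

-- ===== LEMMAS AND PROOFS =====

-- a simple structural model of s.split('\n')
def pvSplitNL : List Char → List (List Char)
  | [] => [[]]
  | c :: r =>
    if c = '\n' then [] :: pvSplitNL r
    else
      match pvSplitNL r with
      | [] => [[c]]
      | h :: t => (c :: h) :: t

def pvInterNL : List (List Char) → List Char
  | [] => []
  | [p] => p
  | p :: ps => p ++ '\n' :: pvInterNL ps

theorem pvSplitNL_ne_nil (cs : List Char) : pvSplitNL cs ≠ [] := by
  cases cs with
  | nil => simp [pvSplitNL]
  | cons c r =>
    simp only [pvSplitNL]
    split
    · simp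
    · split <;> simp

theorem pvSplitNL_no_nl (cs : List Char) : ∀ p ∈ pvSplitNL cs, '\n' ∉ p := by
  induction cs with
  | nil => simp [pvSplitNL]
  | cons c r ih =>
    by_cases hc : c = '\n'
    · simp only [pvSplitNL, if_pos hc]
      intro p hp
      rcases List.mem_cons.mp hp with h | h
      · simp [h]
      · exact ih p h
    · simp only [pvSplitNL, if_neg hc]
      rcases h : pvSplitNL r with _ | ⟨h0, t⟩
      · exact absurd h (pvSplitNL_ne_nil r)
      · intro p hp
        rcases List.mem_cons.mp hp with h1 | h1
        · subst h1
          intro hmem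
          rcases List.mem_cons.mp hmem with h2 | h2
          · exact hc h2.symm
          · exact ih h0 (h ▸ List.mem_cons_self) h2
        · exact ih p (h ▸ List.mem_cons_of_mem h0 h1)

theorem pvSplitNL_nlfree (u : List Char) (hu : '\n' ∉ u) : pvSplitNL u = [u] := by
  induction u with
  | nil => rfl
  | cons c r ih =>
    have hc : ¬ c = '\n' := fun h => hu (h ▸ List.mem_cons_self)
    have hr : '\n' ∉ r := fun h => hu (List.mem_cons_of_mem c h)
    simp only [pvSplitNL, if_neg hc, ih hr]

theorem pvSplitNL_append_nl (u r : List Char) (hu : '\n' ∉ u) :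
    pvSplitNL (u ++ '\n' :: r) = u :: pvSplitNL r := by
  induction u with
  | nil => simp [pvSplitNL]
  | cons c v ih =>
    have hc : ¬ c = '\n' := fun h => hu (h ▸ List.mem_cons_self)
    have hv : '\n' ∉ v := fun h => hu (List.mem_cons_of_mem c h)
    simp only [List.cons_append, pvSplitNL, if_neg hc, ih hv]

-- Chars.splitOn's fuelled loop computes pvSplitNL
theorem pvSplitOn_go_eq : ∀ (fuel : Nat) (l cur : List Char) (acc : List (List Char)),
    l.length ≤ fuel → '\n' ∉ cur →
    PySem.Chars.splitOn.go ['\n'] fuel l cur acc =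
      acc.reverse ++ pvSplitNL (cur.reverse ++ l) := by
  intro fuel
  induction fuel with
  | zero =>
    intro l cur acc hlen hcur
    have : l = [] := List.eq_nil_of_length_eq_zero (Nat.le_zero.mp hlen)
    subst this
    simp [PySem.Chars.splitOn.go, pvSplitNL_nlfree cur.reverse (by simpa using hcur)]
  | succ fuel ih =>
    intro l cur acc hlen hcur
    cases l with
    | nil =>
      simp [PySem.Chars.splitOn.go, pvSplitNL_nlfree cur.reverse (by simpa using hcur)]
    | cons c rest =>
      simp only [PySem.Chars.splitOn.go]
      by_cases hc : c = '\n'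
      · subst hc
        have hpre : List.isPrefixOf ['\n'] ('\n' :: rest) = true := by
          simp [List.isPrefixOf]
        rw [if_pos hpre]
        have := ih rest [] (cur.reverse :: acc) (by simpa using Nat.le_of_succ_le_succ hlen) (by simp)
        rw [show List.drop (['\n'].length) ('\n' :: rest) = rest from rfl, this,
           pvSplitNL_append_nl cur.reverse rest (by simpa using hcur)]
        simp
      · have hpre : List.isPrefixOf ['\n'] (c :: rest) = false := by
          simp [List.isPrefixOf]
          intro h; exact absurd h.symm hc
        rw [if_neg (by simp [hpre])]
        have hcur' : '\n' ∉ c :: cur := by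
          intro h
          rcases List.mem_cons.mp h with h | h
          · exact hc h.symm
          · exact hcur h
        have := ih rest (c :: cur) acc (by simpa using Nat.le_of_succ_le_succ hlen) hcur'
        rw [this]
        simp

theorem pvSplitOn_eq (cs : List Char) :
    PySem.Chars.splitOn cs ['\n'] = pvSplitNL cs := by
  have := pvSplitOn_go_eq (cs.length + 1) cs [] [] (Nat.le_succ _) (by simp)
  simpa [PySem.Chars.splitOn] using this

theorem pvInterNL_splitNL (cs : List Char) : pvInterNL (pvSplitNL cs) = cs := by
  induction cs with
  | nil => rfl
  | cons c r ih =>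
    simp only [pvSplitNL]
    by_cases hc : c = '\n'
    · subst hc
      rw [if_pos rfl]
      rcases h : pvSplitNL r with _ | ⟨h0, t⟩
      · exact absurd h (pvSplitNL_ne_nil r)
      · rw [h] at ih
        simp only [pvInterNL, List.nil_append]
        rw [ih]
    · rw [if_neg hc]
      rcases h : pvSplitNL r with _ | ⟨h0, t⟩
      · exact absurd h (pvSplitNL_ne_nil r)
      · rw [h] at ih
        cases t with
        | nil => simpa [pvInterNL] using congrArg (c :: ·) ih
        | cons t0 ts => simpa [pvInterNL] using congrArg (c :: ·) ih

-- q splits as rstrip q followed by trailing whitespace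
theorem pvRstrip_decomp (q : List Char) :
    q = PySem.Chars.rstrip q ++ (q.reverse.takeWhile PySem.Chars.isspace).reverse ∧
    ∀ c ∈ (q.reverse.takeWhile PySem.Chars.isspace).reverse, PySem.Chars.isspace c = true := by
  constructor
  · simp only [PySem.Chars.rstrip]
    rw [← List.reverse_append, List.takeWhile_append_dropWhile, List.reverse_reverse]
  · intro c hc
    rw [List.mem_reverse] at hc
    exact List.mem_takeWhile_imp hc

-- a marker of non-whitespace characters is a prefix of q iff it is one of rstrip q
theorem pvStartswith_rstrip (q m : List Char)
    (hns : ∀ c ∈ m, PySem.Chars.isspace c = false) :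
    PySem.Chars.startswith (PySem.Chars.rstrip q) m = PySem.Chars.startswith q m := by
  obtain ⟨hdec, hw⟩ := pvRstrip_decomp q
  set w := (q.reverse.takeWhile PySem.Chars.isspace).reverse with hwdef
  have hpref : PySem.Chars.rstrip q <+: q := ⟨w, hdec.symm⟩
  rw [Bool.eq_iff_iff, PySem.Chars.startswith_iff, PySem.Chars.startswith_iff]
  constructor
  · exact fun h => h.trans hpref
  · intro hq
    have hq2 : m <+: PySem.Chars.rstrip q ++ w := by rw [← hdec]; exact hq
    rcases List.prefix_or_prefix_of_prefix hq2 (List.prefix_append _ _) with h1 | h1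
    · exact h1
    · rcases h1 with ⟨m2, hm2⟩
      cases m2 with
      | nil => rw [← hm2]; simpa using List.prefix_rfl
      | cons d ds =>
        exfalso
        have hd : d ∈ m := by rw [← hm2]; simp
        rcases hq2 with ⟨m3, hm3⟩
        rw [← hm2] at hm3
        have h3 : d :: (ds ++ m3) = w := by
          have := List.append_cancel_left (as := PySem.Chars.rstrip q)
            (bs := d :: (ds ++ m3)) (cs := w) (by simpa [List.append_assoc] using hm3)
          exact this
        have hsp : PySem.Chars.isspace d = true := hw d (by rw [← h3]; exact List.mem_cons_self)
        rw [hns d hd] at hsp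
        exact Bool.false_ne_true hsp

-- a '\n'-free marker is a prefix of q ++ '\n'::t iff it is a prefix of q
theorem pvStartswith_append_nl (q t m : List Char) (hm : '\n' ∉ m) :
    PySem.Chars.startswith (q ++ '\n' :: t) m = PySem.Chars.startswith q m := by
  rw [Bool.eq_iff_iff, PySem.Chars.startswith_iff, PySem.Chars.startswith_iff]
  constructor
  · intro hq
    rcases List.prefix_or_prefix_of_prefix hq (List.prefix_append _ _) with h1 | h1
    · exact h1
    · rcases h1 with ⟨m2, hm2⟩
      cases m2 with
      | nil => simpa [← hm2] using List.prefix_rfl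
      | cons d ds =>
        exfalso
        have hd : d = '\n' := by
          rcases hq with ⟨m3, hm3⟩
          rw [← hm2] at hm3
          have h3 : d :: (ds ++ m3) = '\n' :: t :=
            List.append_cancel_left (as := q) (by simpa [List.append_assoc] using hm3)
          exact (List.cons_eq_cons.mp h3).1
        apply hm
        rw [← hm2, hd]
        simp
  · intro hq
    exact hq.trans (List.prefix_append _ _)

-- the or-chain of marker tests
def pvMark (s : List Char) : Bool :=
  PySem.Chars.startswith s ['#'] ||
  PySem.Chars.startswith s ['%'] ||
  PySem.Chars.startswith s ['"', '"', '"'] ||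
  PySem.Chars.startswith s ['\'', '\'', '\'']

theorem pvMark_rstrip (q : List Char) : pvMark (PySem.Chars.rstrip q) = pvMark q := by
  simp only [pvMark]
  rw [pvStartswith_rstrip q ['#'] (by intro c hc; fin_cases hc <;> rfl),
      pvStartswith_rstrip q ['%'] (by intro c hc; fin_cases hc <;> rfl),
      pvStartswith_rstrip q ['"', '"', '"'] (by intro c hc; fin_cases hc <;> rfl),
      pvStartswith_rstrip q ['\'', '\'', '\''] (by intro c hc; fin_cases hc <;> rfl)]

theorem pvMark_append_nl (q t : List Char) : pvMark (q ++ '\n' :: t) = pvMark q := by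
  simp only [pvMark]
  rw [pvStartswith_append_nl q t ['#'] (by intro h; simp at h),
      pvStartswith_append_nl q t ['%'] (by intro h; simp at h),
      pvStartswith_append_nl q t ['"', '"', '"'] (by intro h; simp at h),
      pvStartswith_append_nl q t ['\'', '\'', '\''] (by intro h; simp at h)]

theorem pvRstrip_ne_nil (q : List Char) (c : Char) (q' : List Char)
    (hq : q = c :: q') (hc : PySem.Chars.isspace c = false) :
    PySem.Chars.rstrip q ≠ [] := by
  intro hnil
  rcases pvRstrip_decomp q with ⟨hdec, hw⟩
  rw [hnil, List.nil_append] at hdec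
  have : PySem.Chars.isspace c = true := hw c (by rw [← hdec, hq]; exact List.mem_cons_self)
  rw [hc] at this
  exact Bool.false_ne_true this

theorem checkLinesA_cons_empty (line : List Char) (rest : List (List Char))
    (h : PySem.Chars.strip line = []) : checkLinesA (line :: rest) = checkLinesA rest := by
  simp [checkLinesA, h]

theorem checkLinesA_cons_nonempty (line : List Char) (rest : List (List Char))
    (h : PySem.Chars.strip line ≠ []) : checkLinesA (line :: rest) = pvMark (PySem.Chars.strip line) := by
  simp [checkLinesA, pvMark, h]

-- main loop invariant: on '\n'-free non-empty line lists, A's loop equals B's check of the joined text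
theorem pvLoop_eq : ∀ (ps : List (List Char)), ps ≠ [] → (∀ p ∈ ps, '\n' ∉ p) →
    checkLinesA ps = pvMark (PySem.Chars.lstrip (pvInterNL ps)) := by
  intro ps
  induction ps with
  | nil => intro h; exact absurd rfl h
  | cons p ps ih =>
    intro _ hfree
    rcases hq : List.dropWhile PySem.Chars.isspace p with _ | ⟨c, q'⟩
    -- p is all whitespace: A skips the line, B's lstrip swallows it together with the '\n'
    · have hstrip : PySem.Chars.strip p = [] := by
        simp [PySem.Chars.strip, PySem.Chars.lstrip, hq, PySem.Chars.rstrip]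
      rw [checkLinesA_cons_empty p ps hstrip]
      cases ps with
      | nil =>
        show checkLinesA [] = pvMark (PySem.Chars.lstrip p)
        simp only [PySem.Chars.lstrip, hq]
        rfl
      | cons p2 ps2 =>
        rw [ih (by simp) (fun r hr => hfree r (List.mem_cons_of_mem p hr))]
        show _ = pvMark (PySem.Chars.lstrip (p ++ '\n' :: pvInterNL (p2 :: ps2)))
        simp only [PySem.Chars.lstrip, List.dropWhile_append, hq, List.isEmpty_nil, if_true,
          List.dropWhile_cons_of_pos (by decide : PySem.Chars.isspace '\n' = true)]
    -- p has a non-whitespace character: both sides decide on this line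
    · have hc : PySem.Chars.isspace c = false := by
        have := List.head_dropWhile_not PySem.Chars.isspace (l := p) (by simp [hq])
        simpa [hq] using this
      have hstrip_ne : PySem.Chars.strip p ≠ [] := by
        simp only [PySem.Chars.strip, PySem.Chars.lstrip, hq]
        exact pvRstrip_ne_nil _ c q' rfl hc
      rw [checkLinesA_cons_nonempty p ps hstrip_ne]
      have hmark : pvMark (PySem.Chars.strip p) = pvMark (c :: q') := by
        simp only [PySem.Chars.strip, PySem.Chars.lstrip, hq]
        exact pvMark_rstrip (c :: q')
      rw [hmark]
      cases ps with
      | nil =>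
        show _ = pvMark (PySem.Chars.lstrip p)
        simp only [PySem.Chars.lstrip, hq]
      | cons p2 ps2 =>
        show _ = pvMark (PySem.Chars.lstrip (p ++ '\n' :: pvInterNL (p2 :: ps2)))
        simp only [PySem.Chars.lstrip, List.dropWhile_append, hq, List.isEmpty_cons,
          Bool.false_eq_true, if_false]
        rw [pvMark_append_nl]

-- ===== VERDICT (by name: the statement is the Claim_ definition above) =====
theorem check_comment_spec : Claim_equal_check_comment := by
  intro file_content _
  unfold Spec_check_comment check_comment check_comment_alt
  rw [pvSplitOn_eq]
  rw [pvLoop_eq (pvSplitNL file_content.toList) (pvSplitNL_ne_nil _) (pvSplitNL_no_nl _)]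
  rw [pvInterNL_splitNL]
  rfl
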